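-- pv_equiv track=rewrite | github.com/Ansh-cell/Leetcode | 01. Array_List Questions/01. Easy Questions/14. cells with odd values in a matrix.py | apply_increment
-- ===== SOURCE A (Python) =====
-- def apply_increment(m, n, indices):
--
--     zero_matrix = []    # Space Complexity: O(m + n)
--
--     for i in range(m):      # Time Complexity: O(m*n)
--         a = []
--         for j in range(n):
--             a.append(0)
--         zero_matrix.append(a)
--
--     for r, c in indices:        # Time Complexity: O(m^2 + m*n)
--
--         for i in range(len(zero_matrix[r])):    # Time Complexity: O(n) n: column
--             zero_matrix[r][i] += 1
--         for j in range(len(zero_matrix)):   # Time Complexity: O(m) m: row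
--             zero_matrix[j][c] += 1
--
--     return zero_matrix
-- ===== SOURCE B (Python) =====
-- def apply_increment(m, n, indices):
--     rows = [0] * m
--     cols = [0] * n
--     for r, c in indices:
--         rows[r] += 1
--         cols[c] += 1
--     return [[ri + cj for cj in cols] for ri in rows]
-- ===== Notes on version B (the rewrite author's own statement) =====
-- stated objective: alternative
-- what changed: Instead of walking a whole row and a whole column of the materialised matrix for every index pair, B keeps one per-row and one per-column increment counter and fills each cell once as rows[i]+cols[j]; intended as faster (O(|indices|+m*n) vs O(|indices|*(m+n)+m*n)) but a timing run measured only 1.35x at the largest size both finished.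
import Mathlib
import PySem

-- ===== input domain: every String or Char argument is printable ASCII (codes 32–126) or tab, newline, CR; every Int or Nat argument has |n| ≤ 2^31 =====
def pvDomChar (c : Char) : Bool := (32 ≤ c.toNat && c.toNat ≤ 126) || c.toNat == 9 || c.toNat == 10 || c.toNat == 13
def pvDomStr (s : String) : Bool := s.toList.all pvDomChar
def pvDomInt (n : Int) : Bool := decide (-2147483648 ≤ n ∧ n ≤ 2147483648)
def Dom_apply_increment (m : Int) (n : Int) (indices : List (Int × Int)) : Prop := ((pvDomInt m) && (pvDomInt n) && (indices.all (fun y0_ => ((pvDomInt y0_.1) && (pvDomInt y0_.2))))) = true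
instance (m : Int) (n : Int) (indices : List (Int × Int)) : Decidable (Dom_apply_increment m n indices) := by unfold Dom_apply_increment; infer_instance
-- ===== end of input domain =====

-- B replaces A's per-index row+column sweeps over the matrix by per-row/per-column counters
-- accumulated in one pass over indices and combined cellwise as rows[i]+cols[j] (alternative algorithm).

-- Python index normalisation for `l[i]` (exact when -len(l) ≤ i < len(l), which Pre_ guarantees)
def pvNorm (len : Nat) (i : Int) : Nat := (if i < 0 then i + len else i).toNat

-- `l[i] += 1` on a Python list (both Pythons perform exactly this element increment)
def pvBump (l : List Int) (i : Int) : List Int :=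
  l.set (pvNorm l.length i) (l.getD (pvNorm l.length i) 0 + 1)

-- ===== PORT A =====
-- loop body of A's `for r, c in indices`: add 1 to every entry of row r, then `+= 1` at column c of every row
def pvStepA (mat : List (List Int)) (rc : Int × Int) : List (List Int) :=
  (mat.set (pvNorm mat.length rc.1) ((mat.getD (pvNorm mat.length rc.1) []).map (· + 1))).map
    (fun row => pvBump row rc.2)

def apply_increment (m : Int) (n : Int) (indices : List (Int × Int)) : List (List Int) :=
  let zero_matrix := (PySem.List.pyRange 0 m 1).map (fun _ => (PySem.List.pyRange 0 n 1).map (fun _ => (0 : Int)))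
  indices.foldl pvStepA zero_matrix

-- ===== PORT B =====
-- loop body of B's `for r, c in indices`: rows[r] += 1; cols[c] += 1
def pvStepB (p : List Int × List Int) (rc : Int × Int) : List Int × List Int :=
  (pvBump p.1 rc.1, pvBump p.2 rc.2)

def apply_increment_alt (m : Int) (n : Int) (indices : List (Int × Int)) : List (List Int) :=
  let rows := (PySem.List.pyRange 0 m 1).map (fun _ => (0 : Int))
  let cols := (PySem.List.pyRange 0 n 1).map (fun _ => (0 : Int))
  let q := indices.foldl pvStepB (rows, cols)
  q.1.map (fun ri => q.2.map (fun cj => ri + cj))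

-- ===== PRECONDITION & SPEC =====
-- Pre_ admits exactly the inputs where A returns: every index pair is a valid Python index
-- (-m ≤ r < m, -n ≤ c < n); outside it A raises IndexError (and so does the Python B).
def Pre_apply_increment (m : Int) (n : Int) (indices : List (Int × Int)) : Prop :=
  ∀ p ∈ indices, (-m ≤ p.1 ∧ p.1 < m) ∧ (-n ≤ p.2 ∧ p.2 < n)
instance (m : Int) (n : Int) (indices : List (Int × Int)) : Decidable (Pre_apply_increment m n indices) := by unfold Pre_apply_increment; infer_instance
def pvWitness_apply_increment : Int × Int × (List (Int × Int)) := (2, 3, [(0, 1), (-1, -3), (1, 2)])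

def Spec_apply_increment (m : Int) (n : Int) (indices : List (Int × Int)) (out : List (List Int)) : Prop := out = apply_increment_alt m n indices
instance (m : Int) (n : Int) (indices : List (Int × Int)) (out : List (List Int)) : Decidable (Spec_apply_increment m n indices out) := by unfold Spec_apply_increment; infer_instance

-- ===== CLAIM (what is proved, stated in full; the proofs are below) =====
def Claim_equal_apply_increment : Prop := ∀ (m : Int) (n : Int) (indices : List (Int × Int)), Dom_apply_increment m n indices → Pre_apply_increment m n indices → Spec_apply_increment m n indices (apply_increment m n indices)

-- ===== LEMMAS AND PROOFS =====

-- the "row count + column count" matrix shape both folds preserve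
def pvMk (M N : Nat) (f g : Nat → Int) : List (List Int) :=
  (List.range M).map (fun i => (List.range N).map (fun j => f i + g j))

def pvUpd (f : Nat → Int) (k : Nat) : Nat → Int := fun t => if t = k then f t + 1 else f t

theorem pv_set_map_range {α : Type} (M : Nat) (f : Nat → α) (k : Nat) (v : α) (hk : k < M) :
    ((List.range M).map f).set k v = (List.range M).map (fun i => if i = k then v else f i) := by
  clear hk
  apply List.ext_getElem
  · simp
  · intro i h1 h2
    simp only [List.getElem_set, List.getElem_map, List.getElem_range]
    split_ifs <;> first | rfl | omega

theorem pv_getD_map_range {α : Type} (M : Nat) (f : Nat → α) (k : Nat) (d : α) (hk : k < M) :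
    ((List.range M).map f).getD k d = f k := by
  rw [List.getD_eq_getElem _ _ (by simpa using hk)]
  simp

theorem pv_bump_map_range (M : Nat) (f : Nat → Int) (i : Int)
    (h1 : -(M : Int) ≤ i) (h2 : i < M) :
    pvBump ((List.range M).map f) i = (List.range M).map (pvUpd f (pvNorm M i)) := by
  have hk : pvNorm M i < M := by unfold pvNorm; split <;> omega
  unfold pvBump
  rw [List.length_map, List.length_range,
      pv_getD_map_range M f _ 0 hk, pv_set_map_range M f _ _ hk]
  apply List.map_congr_left
  intro t _
  unfold pvUpd
  split_ifs with h3 h4 <;> simp_all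

theorem pv_stepA_mk (M N : Nat) (f g : Nat → Int) (r c : Int)
    (hr1 : -(M : Int) ≤ r) (hr2 : r < M) (hc1 : -(N : Int) ≤ c) (hc2 : c < N) :
    pvStepA (pvMk M N f g) (r, c) = pvMk M N (pvUpd f (pvNorm M r)) (pvUpd g (pvNorm N c)) := by
  have hkr : pvNorm M r < M := by unfold pvNorm; split <;> omega
  unfold pvStepA pvMk
  simp only
  rw [List.length_map, List.length_range,
      pv_getD_map_range M _ _ [] hkr, pv_set_map_range M _ _ _ hkr, List.map_map]
  apply List.map_congr_left
  intro i _
  simp only [Function.comp]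
  split_ifs with hi
  · subst hi
    rw [List.map_map]
    have h9 : ((· + 1) ∘ fun j => f (pvNorm M r) + g j : Nat → Int)
        = fun j : Nat => (f (pvNorm M r) + 1) + g j := by
      funext j; simp only [Function.comp]; ring
    rw [h9, pv_bump_map_range N _ c hc1 hc2]
    apply List.map_congr_left
    intro j _
    unfold pvUpd
    rw [if_pos rfl]
    split_ifs <;> ring
  · rw [pv_bump_map_range N _ c hc1 hc2]
    apply List.map_congr_left
    intro j _
    unfold pvUpd
    rw [if_neg hi]
    split_ifs <;> ring

theorem pv_stepB_maps (M N : Nat) (f g : Nat → Int) (r c : Int)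
    (hr1 : -(M : Int) ≤ r) (hr2 : r < M) (hc1 : -(N : Int) ≤ c) (hc2 : c < N) :
    pvStepB ((List.range M).map f, (List.range N).map g) (r, c) =
      ((List.range M).map (pvUpd f (pvNorm M r)), (List.range N).map (pvUpd g (pvNorm N c))) := by
  unfold pvStepB
  rw [pv_bump_map_range M f r hr1 hr2, pv_bump_map_range N g c hc1 hc2]

def pvCombine (p : List Int × List Int) : List (List Int) :=
  p.1.map (fun ri => p.2.map (fun cj => ri + cj))

theorem pv_mk_eq_combine (M N : Nat) (f g : Nat → Int) :
    pvMk M N f g = pvCombine ((List.range M).map f, (List.range N).map g) := by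
  unfold pvMk pvCombine
  simp [List.map_map, Function.comp]

theorem pv_main (M N : Nat) (l : List (Int × Int)) :
    ∀ (f g : Nat → Int),
      (∀ p ∈ l, (-(M : Int) ≤ p.1 ∧ p.1 < M) ∧ (-(N : Int) ≤ p.2 ∧ p.2 < N)) →
      l.foldl pvStepA (pvMk M N f g) =
        pvCombine (l.foldl pvStepB ((List.range M).map f, (List.range N).map g)) := by
  induction l with
  | nil => intro f g _; simpa using pv_mk_eq_combine M N f g
  | cons p l ih =>
    intro f g h
    obtain ⟨⟨hr1, hr2⟩, hc1, hc2⟩ := h p (List.mem_cons_self ..)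
    have hrest := fun q hq => h q (List.mem_cons_of_mem _ hq)
    obtain ⟨r, c⟩ := p
    simp only [List.foldl_cons]
    rw [pv_stepA_mk M N f g r c hr1 hr2 hc1 hc2,
        pv_stepB_maps M N f g r c hr1 hr2 hc1 hc2]
    exact ih _ _ hrest

theorem pv_const_map {α : Type} (m : Int) (c : α) :
    (PySem.List.pyRange 0 m 1).map (fun _ => c) = (List.range m.toNat).map (fun _ => c) := by
  rw [PySem.List.pyRange_one, List.map_map, Int.sub_zero]
  apply List.map_congr_left
  intro k _
  rfl

-- ===== VERDICT (by name: the statement is the Claim_ definition above) =====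
theorem apply_increment_spec : Claim_equal_apply_increment := by
  intro m n indices _ hpre
  unfold Spec_apply_increment apply_increment apply_increment_alt
  simp only
  rw [pv_const_map n (0 : Int),
      pv_const_map m ((List.range n.toNat).map (fun _ => (0 : Int))),
      pv_const_map m (0 : Int)]
  have hzero : (List.range m.toNat).map (fun _ => (List.range n.toNat).map (fun _ => (0 : Int))) =
      pvMk m.toNat n.toNat (fun _ => 0) (fun _ => 0) := by
    unfold pvMk; simp
  rw [hzero]
  have hvalid : ∀ p ∈ indices,
      (-(m.toNat : Int) ≤ p.1 ∧ p.1 < m.toNat) ∧ (-(n.toNat : Int) ≤ p.2 ∧ p.2 < n.toNat) := by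
    intro p hp
    obtain ⟨⟨h1, h2⟩, h3, h4⟩ := hpre p hp
    omega
  exact pv_main m.toNat n.toNat indices _ _ hvalid
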